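-- pv_equiv track=rewrite | github.com/EmberDes/LeetCode | 3842-toggle-light-bulbs/3842-toggle-light-bulbs.py | toggleLightBulbs
-- ===== SOURCE A (Python) =====
-- def toggleLightBulbs(bulbs):
--     """
--     :type bulbs: List[int]
--     :rtype: List[int]
--     """
--     result ={}
--     for a in bulbs :
--         result[a] = result.get(a,0) + 1
--
--     for key in result:
--             if result[key]%2 == 0 :
--                 result[key] = 0
--
--             else:
--                 result[key] = 1
--     main = ([k for k , v in result.items() if v == 1])
--     main.sort()
--     return(main)
-- ===== SOURCE B (Python) =====
-- def toggleLightBulbs(bulbs):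
--     """
--     :type bulbs: List[int]
--     :rtype: List[int]
--     """
--     odd = set()
--     for a in bulbs:
--         if a in odd:
--             odd.discard(a)
--         else:
--             odd.add(a)
--     return sorted(odd)
-- ===== Notes on version B (the rewrite author's own statement) =====
-- stated objective: idiomatic
-- what changed: Replaces the count-dict plus parity-normalizing pass plus filter (three passes) with a single toggling pass maintaining a set whose membership is the odd parity, then sorts it.
import Mathlib
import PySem

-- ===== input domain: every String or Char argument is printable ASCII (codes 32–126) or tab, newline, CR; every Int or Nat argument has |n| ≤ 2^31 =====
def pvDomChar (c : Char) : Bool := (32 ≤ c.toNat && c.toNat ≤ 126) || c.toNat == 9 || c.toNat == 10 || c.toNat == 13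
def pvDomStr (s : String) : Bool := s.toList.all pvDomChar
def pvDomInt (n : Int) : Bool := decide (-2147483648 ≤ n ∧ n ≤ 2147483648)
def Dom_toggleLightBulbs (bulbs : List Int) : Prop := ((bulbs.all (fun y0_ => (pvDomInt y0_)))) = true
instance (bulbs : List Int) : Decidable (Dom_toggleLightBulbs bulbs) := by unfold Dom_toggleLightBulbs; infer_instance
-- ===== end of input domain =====

-- B replaces A's count-dict, parity-normalizing pass and filter (three passes) with one
-- toggling pass over a set whose membership is the odd parity, then sorts it (same cost, more idiomatic).

-- ===== PORT A =====
-- second loop body: 'if result[key] % 2 == 0: result[key] = 0 else: result[key] = 1';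
-- the key is always present (we iterate result's own keys), so 'result[key]' is ported as 'getD key 0' exactly.
def pvParLoop (d : PySem.Dict Int Int) (key : Int) : PySem.Dict Int Int :=
  if PySem.Int.mod (d.getD key 0) 2 == 0 then d.insert key 0 else d.insert key 1

def toggleLightBulbs (bulbs : List Int) : List Int :=
  let result := bulbs.foldl (fun d a => d.insert a (d.getD a 0 + 1)) PySem.Dict.empty
  let result2 := result.keys.foldl pvParLoop result
  let main := (result2.items.filter (fun kv => kv.2 == 1)).map Prod.fst
  PySem.List.sorted main (fun x => x) false

-- ===== PORT B =====
def pvToggle (s : PySem.Set Int) (a : Int) : PySem.Set Int :=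
  if s.contains a then s.discard a else s.add a

def toggleLightBulbs_alt (bulbs : List Int) : List Int :=
  let odd := bulbs.foldl pvToggle PySem.Set.empty
  PySem.List.sorted odd (fun x => x) false

-- ===== PRECONDITION & SPEC =====
def Spec_toggleLightBulbs (bulbs : List Int) (out : List Int) : Prop := out = toggleLightBulbs_alt bulbs
instance (bulbs : List Int) (out : List Int) : Decidable (Spec_toggleLightBulbs bulbs out) := by unfold Spec_toggleLightBulbs; infer_instance

-- ===== CLAIM (what is proved, stated in full; the proofs are below) =====
def Claim_equal_toggleLightBulbs : Prop := ∀ (bulbs : List Int), Dom_toggleLightBulbs bulbs → Spec_toggleLightBulbs bulbs (toggleLightBulbs bulbs)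

-- ===== LEMMAS AND PROOFS =====

-- B side: the toggled set is nodup and holds exactly the elements of odd count.
theorem mem_pvToggle (s : PySem.Set Int) (a x : Int) :
    x ∈ pvToggle s a ↔ (if x = a then a ∉ s else x ∈ s) := by
  unfold pvToggle
  by_cases hc : a ∈ s
  · rw [if_pos ((PySem.Set.contains_iff s a).mpr hc), PySem.Set.mem_discard]
    by_cases hxa : x = a <;> simp [hxa, hc]
  · rw [if_neg (by simpa [PySem.Set.contains_iff] using hc), PySem.Set.mem_add]
    by_cases hxa : x = a <;> simp [hxa, hc]

theorem nodup_foldl_pvToggle (l : List Int) (s : PySem.Set Int) (hs : List.Nodup s) :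
    List.Nodup (l.foldl pvToggle s) := by
  induction l generalizing s with
  | nil => exact hs
  | cons a l ih =>
      apply ih
      unfold pvToggle
      split_ifs
      · exact PySem.Set.nodup_discard s a hs
      · exact PySem.Set.nodup_add s a hs

theorem mem_foldl_pvToggle (l : List Int) (s : PySem.Set Int) (x : Int) :
    x ∈ l.foldl pvToggle s ↔ (x ∈ s ↔ l.count x % 2 = 0) := by
  induction l generalizing s with
  | nil => simp
  | cons a l ih =>
      rw [List.foldl_cons, ih, mem_pvToggle]
      by_cases hxa : x = a
      · subst hxa
        have hcount : (x :: l).count x = l.count x + 1 := by simp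
        rw [if_pos rfl, hcount,
          show (l.count x + 1) % 2 = 0 ↔ ¬(l.count x % 2 = 0) from by omega]
        tauto
      · have hcount : List.count x (a :: l) = List.count x l := by
          simp [Ne.symm hxa]
        rw [if_neg hxa, hcount]

-- A side: the value each key holds after the parity-normalizing loop.
theorem pvParLoop_eq (d : PySem.Dict Int Int) (k : Int) :
    pvParLoop d k = d.insert k (if PySem.Int.mod (d.getD k 0) 2 == 0 then 0 else 1) := by
  unfold pvParLoop; split_ifs with h <;> simp

theorem getD_pvParLoop (d : PySem.Dict Int Int) (k x : Int) :
    (pvParLoop d k).getD x 0 =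
      if x = k then (if PySem.Int.mod (d.getD k 0) 2 == 0 then 0 else 1) else d.getD x 0 := by
  rw [pvParLoop_eq, PySem.Dict.getD_insert]

theorem getD_foldl_pvParLoop (ks : List Int) (d : PySem.Dict Int Int) (hnd : ks.Nodup) (x : Int) :
    (ks.foldl pvParLoop d).getD x 0 =
      if x ∈ ks then (if PySem.Int.mod (d.getD x 0) 2 == 0 then 0 else 1) else d.getD x 0 := by
  induction ks generalizing d with
  | nil => simp
  | cons k ks ih =>
      have hk : k ∉ ks := (List.nodup_cons.mp hnd).1
      rw [List.foldl_cons, ih _ (List.nodup_cons.mp hnd).2]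
      by_cases hmem : x ∈ ks
      · have hxk : x ≠ k := fun h => hk (h ▸ hmem)
        rw [if_pos hmem, getD_pvParLoop, if_neg hxk, if_pos (List.mem_cons_of_mem _ hmem)]
      · rw [if_neg hmem, getD_pvParLoop]
        by_cases hxk : x = k
        · subst hxk
          rw [if_pos rfl, if_pos (List.mem_cons_self)]
        · rw [if_neg hxk, if_neg (by simp [hxk, hmem])]

-- first-match lookup agrees with any listed pair when the keys are distinct
theorem get?_of_mem_items (L : List (Int × Int)) (h : (L.map Prod.fst).Nodup) (x v : Int)
    (hm : (x, v) ∈ L) : (PySem.Dict.mk L).get? x = some v := by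
  induction L with
  | nil => simp at hm
  | cons p L ih =>
      simp only [List.map_cons, List.nodup_cons] at h
      rcases List.mem_cons.mp hm with h1 | h1
      · simp [PySem.Dict.get?, List.find?, ← h1]
      · have hne : p.1 ≠ x := by
          intro he
          exact h.1 (he ▸ (List.mem_map.mpr ⟨(x, v), h1, rfl⟩))
        have hstep : (PySem.Dict.mk (p :: L)).get? x = (PySem.Dict.mk L).get? x := by
          simp only [PySem.Dict.get?]
          rw [List.find?_cons_of_neg (by simp [hne])]
        rw [hstep]
        exact ih h.2 h1

theorem mem_items_of_get? (d : PySem.Dict Int Int) (x v : Int)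
    (h : d.get? x = some v) : (x, v) ∈ d.items := by
  simp only [PySem.Dict.get?, Option.map_eq_some_iff] at h
  obtain ⟨p, hp, hv⟩ := h
  have hm := List.mem_of_find?_eq_some hp
  have hx := List.find?_some hp
  rcases p with ⟨a, b⟩
  simp at hx hv
  subst hx; subst hv
  exact hm

theorem pymod_two_cast (n : Nat) :
    ((PySem.Int.mod (n : Int) 2 == 0) = true) ↔ n % 2 = 0 := by
  rw [PySem.Int.mod, Int.fmod_eq_emod]
  simp
  omega

-- the key list that A's second loop iterates is the distinct elements of bulbs
theorem mainA_mem (bulbs : List Int) (x : Int) :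
    x ∈ ((((bulbs.foldl (fun d a => d.insert a (d.getD a 0 + 1)) (PySem.Dict.empty : PySem.Dict Int Int)).keys.foldl
            pvParLoop (bulbs.foldl (fun d a => d.insert a (d.getD a 0 + 1)) (PySem.Dict.empty : PySem.Dict Int Int))).items.filter
          (fun kv => kv.2 == 1)).map Prod.fst) ↔ bulbs.count x % 2 = 1 := by
  have hd1 : bulbs.foldl (fun d a => d.insert a (d.getD a 0 + 1)) (PySem.Dict.empty : PySem.Dict Int Int)
      = PySem.Dict.counter bulbs := rfl
  rw [hd1]
  set d1 := PySem.Dict.counter bulbs with hd1def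
  set d2 := d1.keys.foldl pvParLoop d1 with hd2def
  have hknd : d1.keys.Nodup := PySem.Dict.nodup_keys_counter bulbs
  have hgetD : ∀ y : Int, d2.getD y 0 =
      if y ∈ d1.keys then (if PySem.Int.mod (d1.getD y 0) 2 == 0 then 0 else 1) else d1.getD y 0 :=
    fun y => getD_foldl_pvParLoop d1.keys d1 hknd y
  have hkeys2 : d2.keys = PySem.Set.update d1.keys d1.keys := by
    rw [hd2def, show pvParLoop = fun d k =>
          d.insert k (if PySem.Int.mod (d.getD k 0) 2 == 0 then 0 else 1) from
        funext fun d => funext fun k => pvParLoop_eq d k]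
    exact PySem.Dict.keys_foldl_insert d1.keys _ d1
  have hkeys2nd : d2.keys.Nodup := by
    rw [hkeys2]; exact PySem.Set.nodup_update _ _ hknd
  have hmemk : ∀ y : Int, y ∈ d1.keys ↔ y ∈ bulbs := by
    intro y
    rw [hd1def, PySem.Dict.keys_counter, PySem.Set.mem_ofList]
  constructor
  · intro hx
    obtain ⟨kv, hkv, hfst⟩ := List.mem_map.mp hx
    obtain ⟨hitems, hv1⟩ := List.mem_filter.mp hkv
    rcases kv with ⟨k, v⟩
    simp at hv1 hfst
    subst hv1
    rw [hfst] at hitems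
    have hget : d2.get? x = some 1 := get?_of_mem_items d2.items hkeys2nd x 1 hitems
    have hxk2 : x ∈ d2.keys := by
      by_contra hn
      rw [(PySem.Dict.get?_eq_none_iff_not_mem_keys d2 x).mpr hn] at hget
      simp at hget
    have hxb : x ∈ bulbs := by
      rw [hkeys2] at hxk2
      rcases (PySem.Set.mem_update _ _ _).mp hxk2 with h | h <;> exact (hmemk x).mp h
    have hD : d2.getD x 0 = 1 := by
      rw [PySem.Dict.getD, hget]; rfl
    rw [hgetD x, if_pos ((hmemk x).mpr hxb), hd1def, PySem.Dict.getD_counter] at hD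
    by_cases hpar : bulbs.count x % 2 = 0
    · rw [if_pos ((pymod_two_cast _).mpr hpar)] at hD
      exact absurd hD (by norm_num)
    · omega
  · intro hodd
    have hxb : x ∈ bulbs := by
      by_contra hn
      rw [List.count_eq_zero_of_not_mem hn] at hodd
      omega
    have hxk2 : x ∈ d2.keys := by
      rw [hkeys2]
      exact (PySem.Set.mem_update _ _ _).mpr (Or.inl ((hmemk x).mpr hxb))
    obtain ⟨v, hv⟩ : ∃ v, d2.get? x = some v := by
      cases hg : d2.get? x with
      | none => exact absurd ((PySem.Dict.get?_eq_none_iff_not_mem_keys d2 x).mp hg) (by simp [hxk2])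
      | some v => exact ⟨v, rfl⟩
    have hD : d2.getD x 0 = v := by rw [PySem.Dict.getD, hv]; rfl
    have hv1 : v = 1 := by
      rw [hgetD x, if_pos ((hmemk x).mpr hxb), hd1def, PySem.Dict.getD_counter] at hD
      rw [if_neg (by rw [pymod_two_cast]; omega)] at hD
      exact hD.symm
    subst hv1
    exact List.mem_map.mpr ⟨(x, 1), List.mem_filter.mpr ⟨mem_items_of_get? d2 x 1 hv, by simp⟩, rfl⟩

-- ===== VERDICT (by name: the statement is the Claim_ definition above) =====
theorem toggleLightBulbs_spec : Claim_equal_toggleLightBulbs := by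
  intro bulbs _
  unfold Spec_toggleLightBulbs
  simp only [toggleLightBulbs, toggleLightBulbs_alt]
  rw [PySem.List.sorted_id_eq_sorted_id_iff_perm]
  have hAnd : ((((bulbs.foldl (fun d a => d.insert a (d.getD a 0 + 1)) (PySem.Dict.empty : PySem.Dict Int Int)).keys.foldl
      pvParLoop (bulbs.foldl (fun d a => d.insert a (d.getD a 0 + 1)) (PySem.Dict.empty : PySem.Dict Int Int))).items.filter
      (fun kv => kv.2 == 1)).map Prod.fst).Nodup := by
    have hd1 : bulbs.foldl (fun d a => d.insert a (d.getD a 0 + 1)) (PySem.Dict.empty : PySem.Dict Int Int)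
        = PySem.Dict.counter bulbs := rfl
    rw [hd1]
    set d1 := PySem.Dict.counter bulbs
    set d2 := d1.keys.foldl pvParLoop d1 with hd2def
    have hkeys2nd : d2.keys.Nodup := by
      rw [hd2def, show pvParLoop = fun d k =>
            d.insert k (if PySem.Int.mod (d.getD k 0) 2 == 0 then 0 else 1) from
          funext fun d => funext fun k => pvParLoop_eq d k]
      rw [PySem.Dict.keys_foldl_insert d1.keys _ d1]
      exact PySem.Set.nodup_update _ _ (PySem.Dict.nodup_keys_counter bulbs)
    have hsub : ((d2.items.filter (fun kv => kv.2 == 1)).map Prod.fst).Sublist (d2.items.map Prod.fst) :=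
      List.filter_sublist.map Prod.fst
    exact List.Nodup.sublist hsub hkeys2nd
  have hBnd : (bulbs.foldl pvToggle PySem.Set.empty).Nodup :=
    nodup_foldl_pvToggle bulbs PySem.Set.empty List.nodup_nil
  rw [List.perm_ext_iff_of_nodup hAnd hBnd]
  intro x
  rw [mainA_mem bulbs x, mem_foldl_pvToggle]
  have : x ∉ PySem.Set.empty := by simp [PySem.Set.empty]
  simp only [this, false_iff]
  omega
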